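-- pv_equiv track=rewrite | github.com/NKcell/LeetCode | 1370. Increasing Decreasing String/_1370.py | sortString1
-- ===== SOURCE A (Python) =====
-- def sortString1(s: str) -> str:
--     import collections
--     cnt, ans, asc = collections.Counter(s), [], True
--     while cnt:                                                                  # if Counter not empty.
--         for c in sorted(cnt.keys()) if asc else reversed(sorted(cnt.keys())):   # traverse keys in ascending/descending order.
--             ans.append(c)                                                       # append the key.
--             cnt[c] -= 1                                                         # decrease the count.
--             if cnt[c] == 0:                                                     # if the count reaches to 0.
--                 del cnt[c]                                                      # remove the key from the Counter.
--         asc = not asc                                                           # change the direction, same as asc ^= True.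
--     return ''.join(ans)
-- ===== SOURCE B (Python) =====
-- def sortString1(s: str) -> str:
--     # Distribute sorted(s) into buckets by occurrence rank (no Counter, no per-round rescans):
--     # the i-th copy of a character lands in bucket i; bucket i is then emitted
--     # ascending for even i and descending for odd i.
--     rounds = []
--     prev, k = None, 0
--     for c in sorted(s):
--         k = k + 1 if c == prev else 0
--         prev = c
--         if k == len(rounds):
--             rounds.append([])
--         rounds[k].append(c)
--     out = []
--     for i, r in enumerate(rounds):
--         out.extend(r if i % 2 == 0 else reversed(r))
--     return ''.join(out)
-- ===== Notes on version B (the rewrite author's own statement) =====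
-- stated objective: alternative
-- what changed: B replaces A's Counter-mutating while-loop (which re-sorts the surviving keys on every round and decrements/deletes counts one character at a time) by a one-pass bucket distribution: it sorts s once and drops each occurrence of a character into the bucket indexed by its occurrence rank within its run, then concatenates the buckets, reversing the odd-indexed ones.
import Mathlib
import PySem

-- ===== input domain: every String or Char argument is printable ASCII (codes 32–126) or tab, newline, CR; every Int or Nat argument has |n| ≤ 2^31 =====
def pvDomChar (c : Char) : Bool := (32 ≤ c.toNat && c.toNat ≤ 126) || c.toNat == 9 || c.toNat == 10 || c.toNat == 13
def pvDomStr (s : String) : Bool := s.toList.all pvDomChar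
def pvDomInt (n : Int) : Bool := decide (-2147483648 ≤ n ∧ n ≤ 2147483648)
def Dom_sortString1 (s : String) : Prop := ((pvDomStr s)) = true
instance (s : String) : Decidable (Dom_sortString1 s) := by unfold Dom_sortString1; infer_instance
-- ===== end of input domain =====

-- B sorts the string once and distributes each occurrence into the bucket given by its
-- occurrence rank (a single linear pass, no Counter mutation, no per-round key re-sorting),
-- then concatenates the buckets, reversing the odd-indexed ones (objective: alternative).


-- ===== PORT A =====
-- one iteration of the for-body: ans.append(c); cnt[c] -= 1; if cnt[c] == 0: del cnt[c]
def pvStepA (d : PySem.Dict Char Int) (c : Char) : PySem.Dict Char Int :=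
  let d1 := d.modify c 0 (· - 1)
  if d1.getD c 0 == 0 then d1.erase c else d1

-- the while-loop; fuel bounds the number of passes (each pass needs the max remaining count,
-- which is at most len(s), so fuel = len(s) is always enough — proved in the lemmas below)
def pvLoopA : Nat → PySem.Dict Char Int → List Char → Bool → List Char
  | 0, _, ans, _ => ans
  | fuel+1, cnt, ans, asc =>
    if cnt.size == 0 then ans
    else
      let ks := if asc then PySem.List.sorted cnt.keys (fun x => x)
                else (PySem.List.sorted cnt.keys (fun x => x)).reverse
      let st := ks.foldl (fun (st : List Char × PySem.Dict Char Int) c =>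
                  (st.1 ++ [c], pvStepA st.2 c)) (ans, cnt)
      pvLoopA fuel st.2 st.1 (!asc)

def sortString1 (s : String) : String :=
  String.ofList (pvLoopA s.toList.length (PySem.Dict.counter s.toList) [] true)

-- ===== PORT B =====
-- one iteration of Source B's distribution loop over sorted(s):
-- k = k + 1 if c == prev else 0; if k == len(rounds): rounds.append([]); rounds[k].append(c)
def pvStepB (st : Option Char × Nat × List (List Char)) (c : Char) :
    Option Char × Nat × List (List Char) :=
  let k := if st.1 == some c then st.2.1 + 1 else 0
  let R := if k == st.2.2.length then st.2.2 ++ [[]] else st.2.2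
  (some c, k, R.modify k (· ++ [c]))

-- for i, r in enumerate(rounds): out.extend(r if i % 2 == 0 else reversed(r)); ''.join(out)
def sortString1_alt (s : String) : String :=
  String.ofList
    ((PySem.List.enumerate
        (((PySem.List.sorted s.toList (fun x => x)).foldl pvStepB (none, 0, [])).2.2) 0).foldl
      (fun acc p => acc ++ (if PySem.Int.mod p.1 2 == 0 then p.2 else p.2.reverse)) [])

-- ===== PRECONDITION & SPEC =====
def Spec_sortString1 (s : String) (out : String) : Prop := out = sortString1_alt s
instance (s : String) (out : String) : Decidable (Spec_sortString1 s out) := by unfold Spec_sortString1; infer_instance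

-- ===== CLAIM (what is proved, stated in full; the proofs are below) =====
def Claim_equal_sortString1 : Prop := ∀ (s : String), Dom_sortString1 s → Spec_sortString1 s (sortString1 s)

-- ===== LEMMAS AND PROOFS =====

-- level k of the answer, phrased over the source list (the common target of both ports)
def pvLevel (t : List Char) (k : Nat) : List Char :=
  let l := (PySem.List.sorted (PySem.Set.ofList t) (fun x => x)).filter
             (fun c => decide (k < t.count c))
  if k % 2 = 0 then l else l.reverse

-- the state of A's counter after k full passes
def pvInv (t : List Char) (k : Nat) (d : PySem.Dict Char Int) : Prop :=
  d.keys.Nodup ∧ (∀ c, c ∈ d.keys ↔ (c ∈ t ∧ k < t.count c)) ∧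
    (∀ c ∈ d.keys, d.get? c = some ((t.count c : Int) - k))

-- erase facts (no erase lemmas in the prelude; proved from the definition)
lemma pv_find?_filter_ne {ν : Type} (l : List (Char × ν)) (x k : Char) (h : x ≠ k) :
    (l.filter (fun p => !(p.1 == k))).find? (fun p => p.1 == x) =
      l.find? (fun p => p.1 == x) := by
  induction l with
  | nil => rfl
  | cons a rest ih =>
    by_cases hk : a.1 = k
    · have hb : (a.1 == k) = true := by simp [hk]
      have hx : (a.1 == x) = false := by
        simp only [beq_eq_false_iff_ne]; rw [hk]; exact fun e => h e.symm
      simp [hb, hx, ih]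
    · have hb : (a.1 == k) = false := by simp [hk]
      by_cases hax : a.1 = x
      · have hx : (a.1 == x) = true := by simp [hax]
        simp [hb, hx]
      · have hx : (a.1 == x) = false := by simp [hax]
        simp [hb, hx, ih]

lemma pv_get?_erase_self (d : PySem.Dict Char Int) (k : Char) :
    (d.erase k).get? k = none := by
  simp only [PySem.Dict.erase, PySem.Dict.get?, Option.map_eq_none_iff, List.find?_eq_none,
    List.mem_filter]
  intro p hp
  simp only [Bool.not_eq_eq_eq_not, Bool.not_true, beq_eq_false_iff_ne] at hp
  simp [hp.2]

lemma pv_get?_erase_of_ne (d : PySem.Dict Char Int) {x k : Char} (h : x ≠ k) :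
    (d.erase k).get? x = d.get? x := by
  simp only [PySem.Dict.erase, PySem.Dict.get?]
  rw [pv_find?_filter_ne d.items x k h]

lemma pv_nodup_keys_erase (d : PySem.Dict Char Int) (k : Char) (h : d.keys.Nodup) :
    (d.erase k).keys.Nodup := by
  have hsub : ((d.items.filter (fun p => !(p.1 == k))).map (fun p => p.1)).Sublist
      (d.items.map (fun p => p.1)) := List.filter_sublist.map _
  exact h.sublist (by simpa [PySem.Dict.erase, PySem.Dict.keys] using hsub)

-- one step of the pass over key c
lemma pvStepA_get?_self (d : PySem.Dict Char Int) (c : Char) :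
    (pvStepA d c).get? c =
      if d.getD c 0 = 1 then none else some (d.getD c 0 - 1) := by
  unfold pvStepA
  simp only [PySem.Dict.modify, PySem.Dict.getD_insert_self]
  by_cases h : d.getD c 0 = 1
  · simp [h, pv_get?_erase_self]
  · have : (d.getD c 0 - 1 == (0:Int)) = false := by
      simp only [beq_eq_false_iff_ne]; omega
    simp [this, PySem.Dict.get?_insert_self, h]

lemma pvStepA_get?_of_ne (d : PySem.Dict Char Int) {x c : Char} (h : x ≠ c) :
    (pvStepA d c).get? x = d.get? x := by
  unfold pvStepA
  simp only [PySem.Dict.modify]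
  by_cases hz : ((d.insert c (d.getD c 0 - 1)).getD c 0 == (0:Int)) = true
  · simp only [hz, if_pos]
    rw [pv_get?_erase_of_ne _ h, PySem.Dict.get?_insert_of_ne _ _ h]
  · simp only [hz, if_neg, Bool.not_eq_true]
    rw [PySem.Dict.get?_insert_of_ne _ _ h]

lemma pvStepA_nodup (d : PySem.Dict Char Int) (c : Char) (h : d.keys.Nodup) :
    (pvStepA d c).keys.Nodup := by
  unfold pvStepA
  simp only [PySem.Dict.modify]
  have h1 := PySem.Dict.nodup_keys_insert d c (d.getD c 0 - 1) h
  by_cases hz : ((d.insert c (d.getD c 0 - 1)).getD c 0 == (0:Int)) = true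
  · simp only [hz, if_pos]; exact pv_nodup_keys_erase _ _ h1
  · simp only [hz, if_neg, Bool.not_eq_true]; exact h1

-- the whole pass fold, key by key
lemma pvPassFold (ks : List Char) (d : PySem.Dict Char Int) (hks : ks.Nodup)
    (hnd : d.keys.Nodup) :
    (∀ x ∈ ks, (ks.foldl pvStepA d).get? x =
        (if d.getD x 0 = 1 then none else some (d.getD x 0 - 1)))
      ∧ (∀ x, x ∉ ks → (ks.foldl pvStepA d).get? x = d.get? x)
      ∧ (ks.foldl pvStepA d).keys.Nodup := by
  induction ks generalizing d with
  | nil => exact ⟨by simp, by simp, hnd⟩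
  | cons c rest ih =>
    have hcr : c ∉ rest := (List.nodup_cons.mp hks).1
    have hrest : rest.Nodup := (List.nodup_cons.mp hks).2
    have hnd1 : (pvStepA d c).keys.Nodup := pvStepA_nodup d c hnd
    obtain ⟨ih1, ih2, ih3⟩ := ih (pvStepA d c) hrest hnd1
    refine ⟨?_, ?_, by simpa using ih3⟩
    · intro x hx
      rcases List.mem_cons.mp hx with hxc | hxr
      · subst hxc
        simp only [List.foldl_cons]
        rw [ih2 x hcr, pvStepA_get?_self]
      · have hxc : x ≠ c := fun e => hcr (e ▸ hxr)
        simp only [List.foldl_cons]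
        rw [ih1 x hxr]
        have hD : (pvStepA d c).getD x 0 = d.getD x 0 := by
          simp only [PySem.Dict.getD_eq_get?_getD, pvStepA_get?_of_ne d hxc]
        rw [hD]
    · intro x hx
      have hxc : x ≠ c := fun e => hx (e ▸ List.mem_cons_self)
      have hxr : x ∉ rest := fun hr => hx (List.mem_cons_of_mem _ hr)
      simp only [List.foldl_cons]
      rw [ih2 x hxr, pvStepA_get?_of_ne d hxc]

-- a pass over all current keys advances the invariant by one level
lemma pvInv_step (t : List Char) (k : Nat) (d : PySem.Dict Char Int) (ks : List Char)
    (hinv : pvInv t k d) (hks : ks.Nodup) (hmem : ∀ x, x ∈ ks ↔ x ∈ d.keys) :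
    pvInv t (k+1) (ks.foldl pvStepA d) := by
  obtain ⟨hnd, hkeys, hval⟩ := hinv
  obtain ⟨h1, h2, h3⟩ := pvPassFold ks d hks hnd
  have hget : ∀ x, (ks.foldl pvStepA d).get? x =
      if x ∈ t ∧ k + 1 < t.count x then some ((t.count x : Int) - (k+1)) else none := by
    intro x
    by_cases hx : x ∈ ks
    · have hxk : x ∈ d.keys := (hmem x).mp hx
      have hgx := hval x hxk
      have hDx : d.getD x 0 = (t.count x : Int) - k := by
        simp [PySem.Dict.getD_eq_get?_getD, hgx]
      have hxt := (hkeys x).mp hxk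
      rw [h1 x hx, hDx]
      by_cases hc : k + 1 < t.count x
      · rw [if_neg (by omega : ¬ ((t.count x : Int) - ↑k = 1)), if_pos ⟨hxt.1, hc⟩]
        congr 1
        omega
      · have h1c : (t.count x : Int) - ↑k = 1 := by omega
        simp [h1c, hc]
    · have hxk : x ∉ d.keys := fun h => hx ((hmem x).mpr h)
      have : d.get? x = none := (PySem.Dict.get?_eq_none_iff_not_mem_keys d x).mpr hxk
      rw [h2 x hx, this]
      have : ¬ (x ∈ t ∧ k + 1 < t.count x) := by
        intro ⟨ht, hc⟩; exact hxk ((hkeys x).mpr ⟨ht, by omega⟩)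
      simp [this]
  refine ⟨h3, ?_, ?_⟩
  · intro c
    constructor
    · intro hc
      by_contra hcc
      have hn : (ks.foldl pvStepA d).get? c = none := by rw [hget c]; simp [hcc]
      exact ((PySem.Dict.get?_eq_none_iff_not_mem_keys _ c).mp hn) hc
    · intro hc
      have hs : (ks.foldl pvStepA d).get? c ≠ none := by rw [hget c]; simp [hc]
      by_contra hcc
      exact hs ((PySem.Dict.get?_eq_none_iff_not_mem_keys _ c).mpr hcc)
  · intro c hc
    have hs : (ks.foldl pvStepA d).get? c ≠ none := by
      intro hn; exact ((PySem.Dict.get?_eq_none_iff_not_mem_keys _ c).mp hn) hc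
    rw [hget c] at hs ⊢
    by_cases hce : c ∈ t ∧ k + 1 < t.count c
    · simp [hce]
    · simp [hce] at hs

-- the sorted keys of the invariant dict are exactly level k's ascending characters
lemma pv_sorted_keys (t : List Char) (k : Nat) (d : PySem.Dict Char Int)
    (hinv : pvInv t k d) :
    PySem.List.sorted d.keys (fun x => x) =
      (PySem.List.sorted (PySem.Set.ofList t) (fun x => x)).filter
        (fun c => decide (k < t.count c)) := by
  obtain ⟨hnd, hkeys, _⟩ := hinv
  apply PySem.List.sorted_eq_of_perm_of_pairwise_lt
  · have hndf : ((PySem.List.sorted (PySem.Set.ofList t) (fun x => x)).filter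
        (fun c => decide (k < t.count c))).Nodup :=
      (((PySem.List.sorted_perm (PySem.Set.ofList t) (fun x => x) false).nodup_iff).mpr
        (PySem.Set.nodup_ofList t)).filter _
    rw [List.perm_ext_iff_of_nodup hndf hnd]
    intro a
    simp only [List.mem_filter, PySem.List.mem_sorted, PySem.Set.mem_ofList,
      decide_eq_true_eq, hkeys a]
  · exact (PySem.List.sorted_ofList_pairwise_lt t).filter _

-- the parity bit flips correctly
lemma pv_parity (k : Nat) : (!decide (k % 2 = 0)) = decide ((k+1) % 2 = 0) := by
  rcases Nat.mod_two_eq_zero_or_one k with h | h <;> simp [h, Nat.add_mod]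

-- main loop lemma: from an invariant state at level k, A's loop emits levels k … M-1
lemma pvLoopA_eq (t : List Char) (M : Nat)
    (hM : ∀ c ∈ t, t.count c ≤ M) (hex : ∃ c ∈ t, M ≤ t.count c) :
    ∀ fuel k d ans, pvInv t k d → M - k ≤ fuel →
      pvLoopA fuel d ans (decide (k % 2 = 0)) =
        ans ++ ((List.range (M - k)).map (fun j => pvLevel t (k + j))).flatten := by
  intro fuel
  induction fuel with
  | zero =>
    intro k d ans _ hf
    have : M - k = 0 := Nat.le_zero.mp hf
    simp [pvLoopA, this]
  | succ fuel ih =>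
    intro k d ans hinv hf
    by_cases hkM : M ≤ k
    · -- no characters left: the dict is empty and the loop stops
      have hkeys : d.keys = [] := by
        rcases hd : d.keys with _ | ⟨c, rest⟩
        · rfl
        · exfalso
          have hc : c ∈ d.keys := by rw [hd]; exact List.mem_cons_self
          obtain ⟨hct, hcc⟩ := (hinv.2.1 c).mp hc
          have := hM c hct
          omega
      have hsz : d.size = 0 := by
        have : d.items = [] := by
          have := congrArg List.length hkeys
          simpa [PySem.Dict.keys, List.length_eq_zero_iff] using this
        simp [PySem.Dict.size, this]
      have : M - k = 0 := by omega
      simp [pvLoopA, hsz, this]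
    · replace hkM : k < M := by omega
      -- the dict is nonempty: some character still has count > k
      obtain ⟨c0, hc0t, hc0M⟩ := hex
      have hc0 : c0 ∈ d.keys := (hinv.2.1 c0).mpr ⟨hc0t, by omega⟩
      have hsz : d.size ≠ 0 := by
        intro h
        have hit : d.items = [] := List.length_eq_zero_iff.mp h
        simp [PySem.Dict.keys, hit] at hc0
      -- the pass emits exactly level k
      have hsorted := pv_sorted_keys t k d hinv
      set asc := (k % 2 = 0 : Prop)
      have hks : (if decide (k % 2 = 0) then PySem.List.sorted d.keys (fun x => x)
          else (PySem.List.sorted d.keys (fun x => x)).reverse) = pvLevel t k := by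
        unfold pvLevel
        by_cases hp : k % 2 = 0 <;> simp [hp, hsorted]
      have hksnd : (pvLevel t k).Nodup := by
        have hndf : ((PySem.List.sorted (PySem.Set.ofList t) (fun x => x)).filter
            (fun c => decide (k < t.count c))).Nodup :=
          (((PySem.List.sorted_perm (PySem.Set.ofList t) (fun x => x) false).nodup_iff).mpr
            (PySem.Set.nodup_ofList t)).filter _
        unfold pvLevel
        by_cases hp : k % 2 = 0 <;> simp [hp, hndf]
      have hksmem : ∀ x, x ∈ pvLevel t k ↔ x ∈ d.keys := by
        intro x
        have : x ∈ pvLevel t k ↔ x ∈ (PySem.List.sorted (PySem.Set.ofList t)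
            (fun x => x)).filter (fun c => decide (k < t.count c)) := by
          unfold pvLevel
          by_cases hp : k % 2 = 0 <;> simp [hp]
        rw [this, List.mem_filter]
        simp only [PySem.List.mem_sorted, PySem.Set.mem_ofList, decide_eq_true_eq]
        exact (hinv.2.1 x).symm
      -- advance
      have hinv' : pvInv t (k+1) ((pvLevel t k).foldl pvStepA d) :=
        pvInv_step t k d (pvLevel t k) hinv hksnd hksmem
      have hrec := ih (k+1) ((pvLevel t k).foldl pvStepA d) (ans ++ pvLevel t k) hinv'
        (by omega)
      show (if d.size == 0 then ans else _) = _
      rw [if_neg (by simpa using hsz)]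
      show pvLoopA fuel
          (((if decide (k % 2 = 0) then PySem.List.sorted d.keys (fun x => x)
             else (PySem.List.sorted d.keys (fun x => x)).reverse).foldl
            (fun (st : List Char × PySem.Dict Char Int) c => (st.1 ++ [c], pvStepA st.2 c))
            (ans, d)).2)
          (((if decide (k % 2 = 0) then PySem.List.sorted d.keys (fun x => x)
             else (PySem.List.sorted d.keys (fun x => x)).reverse).foldl
            (fun (st : List Char × PySem.Dict Char Int) c => (st.1 ++ [c], pvStepA st.2 c))
            (ans, d)).1)
          (!decide (k % 2 = 0)) = _
      rw [hks, PySem.List.foldl_prod_mk (fun (acc : List Char) c => acc ++ [c]) pvStepA]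
      simp only [PySem.List.foldl_append_singleton, pv_parity k]
      rw [hrec]
      have hMk : M - k = (M - (k+1)) + 1 := by omega
      rw [hMk, List.range_succ_eq_map]
      simp only [List.map_cons, List.map_map, List.flatten_cons, List.append_assoc,
        Nat.add_zero]
      congr 2
      congr 1
      apply List.map_congr_left
      intro j _
      simp only [Function.comp_apply, Nat.succ_eq_add_one]
      congr 1
      omega

-- ====== B-side infrastructure: the distribution fold builds the levels of its prefix ======

-- maximal multiplicity in q
def pvMof (q : List Char) : Nat :=
  ((PySem.Set.ofList q).map (fun x => q.count x)).foldl max 0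

-- bucket k of q = the distinct characters of q (first-occurrence order) of multiplicity > k
def pvRof (q : List Char) : List (List Char) :=
  (List.range (pvMof q)).map
    (fun k => (PySem.Set.ofList q).filter (fun x => decide (k < q.count x)))

-- the distribution state after processing prefix q
def pvStB (q : List Char) : Option Char × Nat × List (List Char) :=
  (q.getLast?, q.count ((q.getLast?).getD 'a') - 1, pvRof q)

lemma pvStepB_eval (p : Option Char) (j : Nat) (R : List (List Char)) (c : Char) :
    pvStepB (p, j, R) c =
      (some c,
       if p == some c then j + 1 else 0,
       (if (if p == some c then j + 1 else 0) == R.length then R ++ [[]] else R).modify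
         (if p == some c then j + 1 else 0) (· ++ [c])) := rfl

lemma pv_range_map_getElem {α : Type} (g : Nat → α) (M j : Nat) :
    ((List.range M).map g)[j]? = if j < M then some (g j) else none := by
  split_ifs with h
  · rw [List.getElem?_eq_getElem (by simpa using h)]
    simp
  · exact List.getElem?_eq_none (by simpa using not_lt.mp h)

lemma pv_rof_getElem (q : List Char) (j : Nat) :
    (pvRof q)[j]? =
      if j < pvMof q then
        some ((PySem.Set.ofList q).filter (fun x => decide (j < q.count x)))
      else none := by
  unfold pvRof
  rw [pv_range_map_getElem]

lemma pv_foldl_max_le_iff (l : List Nat) (a m : Nat) :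
    l.foldl max a ≤ m ↔ a ≤ m ∧ ∀ x ∈ l, x ≤ m := by
  induction l generalizing a with
  | nil => simp
  | cons b t ih =>
    rw [List.foldl_cons, ih]
    simp only [List.mem_cons, Nat.max_le]
    constructor
    · rintro ⟨⟨h1, h2⟩, h3⟩
      exact ⟨h1, fun x hx => hx.elim (fun e => e ▸ h2) (h3 x)⟩
    · rintro ⟨h1, h2⟩
      exact ⟨⟨h1, h2 b (Or.inl rfl)⟩, fun x hx => h2 x (Or.inr hx)⟩

lemma pv_foldl_max_attained (l : List Nat) (a : Nat) :
    l.foldl max a = a ∨ l.foldl max a ∈ l := by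
  induction l generalizing a with
  | nil => exact Or.inl rfl
  | cons b t ih =>
    rw [List.foldl_cons]
    rcases ih (max a b) with h | h
    · rcases max_choice a b with h2 | h2
      · exact Or.inl (by rw [h, h2])
      · exact Or.inr (by rw [h, h2]; exact List.mem_cons_self)
    · exact Or.inr (List.mem_cons_of_mem _ h)

lemma pvMof_le_iff (q : List Char) (m : Nat) :
    pvMof q ≤ m ↔ ∀ x ∈ q, q.count x ≤ m := by
  unfold pvMof
  rw [pv_foldl_max_le_iff]
  simp only [Nat.zero_le, true_and, List.mem_map]
  constructor
  · intro h x hx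
    exact h _ ⟨x, (PySem.Set.mem_ofList q x).mpr hx, rfl⟩
  · rintro h y ⟨x, hx, rfl⟩
    exact h x ((PySem.Set.mem_ofList q x).mp hx)

lemma pv_count_le_pvMof (q : List Char) (x : Char) (hx : x ∈ q) : q.count x ≤ pvMof q :=
  (pvMof_le_iff q (pvMof q)).mp (le_refl _) x hx

lemma pv_one_le_pvMof (q : List Char) (hq : q ≠ []) : 1 ≤ pvMof q := by
  obtain ⟨x, hx⟩ := List.exists_mem_of_ne_nil q hq
  exact le_trans (List.count_pos_iff.mpr hx) (pv_count_le_pvMof q x hx)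

lemma pvMof_attained (q : List Char) : pvMof q = 0 ∨ ∃ x ∈ q, pvMof q = q.count x := by
  rcases pv_foldl_max_attained ((PySem.Set.ofList q).map (fun x => q.count x)) 0 with h | h
  · exact Or.inl h
  · obtain ⟨x, hx, he⟩ := List.mem_map.mp h
    exact Or.inr ⟨x, (PySem.Set.mem_ofList q x).mp hx, he.symm⟩

lemma pv_ofList_sublist (xs : List Char) : (PySem.Set.ofList xs).Sublist xs := by
  induction xs using List.reverseRecOn with
  | nil => simp [PySem.Set.ofList_nil]
  | append_singleton q c ih =>
    rw [PySem.Set.ofList_append_singleton, PySem.Set.add_eq_ite]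
    split_ifs with h
    · exact ih.trans (List.sublist_append_left q [c])
    · exact ih.append (List.Sublist.refl [c])

lemma pv_ofList_pairwise_lt (q : List Char) (h : q.Pairwise (· ≤ ·)) :
    (PySem.Set.ofList q).Pairwise (· < ·) := by
  have hle : (PySem.Set.ofList q).Pairwise (· ≤ ·) :=
    List.Pairwise.sublist (pv_ofList_sublist q) h
  have hne : (PySem.Set.ofList q).Pairwise (· ≠ ·) := PySem.Set.nodup_ofList q
  exact (hle.and hne).imp (fun h => lt_of_le_of_ne h.1 h.2)

lemma pv_max_last (D : List Char) (c : Char) (hD : D.Pairwise (· < ·))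
    (hc : c ∈ D) (hmax : ∀ x ∈ D, x ≤ c) :
    ∃ E, D = E ++ [c] ∧ ∀ x ∈ E, x < c := by
  obtain ⟨E, l2, rfl⟩ := List.append_of_mem hc
  have hp := List.pairwise_append.mp hD
  have hcl2 := List.pairwise_cons.mp hp.2.1
  have hl2 : l2 = [] := by
    rcases hx : l2 with _ | ⟨y, ys⟩
    · rfl
    · exfalso
      have h1 : c < y := hcl2.1 y (by rw [hx]; exact List.mem_cons_self)
      have h2 : y ≤ c := hmax y (by rw [hx]; simp)
      exact absurd h1 (not_lt.mpr h2)
  subst hl2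
  exact ⟨E, rfl, fun x hx => hp.2.2 x hx c (by simp)⟩

lemma pv_getLast_of_max (q : List Char) :
    q.Pairwise (· ≤ ·) → ∀ c, c ∈ q → (∀ x ∈ q, x ≤ c) → q.getLast? = some c := by
  induction q with
  | nil => intro _ c hc _; cases hc
  | cons a t ih =>
    intro h c hc hmax
    cases t with
    | nil =>
      have hca : c = a := by simpa using hc
      subst hca
      simp
    | cons b t2 =>
      have h' := List.pairwise_cons.mp h
      have hmem : c ∈ b :: t2 := by
        rcases List.mem_cons.mp hc with rfl | h2
        · have hab : c ≤ b := h'.1 b List.mem_cons_self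
          have hbc : b ≤ c := hmax b (by simp)
          have : b = c := le_antisymm hbc hab
          rw [this]
          exact List.mem_cons_self
        · exact h2
      rw [List.getLast?_cons_cons]
      exact ih h'.2 c hmem (fun x hx => hmax x (List.mem_cons_of_mem _ hx))

-- one distribution step advances the prefix by one character
lemma pv_stepB_eq (q : List Char) (c : Char) (hq : q.Pairwise (· ≤ ·))
    (hmax : ∀ x ∈ q, x ≤ c) :
    pvStepB (pvStB q) c = pvStB (q ++ [c]) := by
  by_cases hq0 : q = []
  · subst hq0
    have hof : PySem.Set.ofList [c] = [c] :=
      PySem.Set.ofList_eq_self_of_nodup [c] (List.nodup_singleton c)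
    have hMc : pvMof [c] = 1 := by
      simp [pvMof, hof, List.count_singleton]
    have hRc : pvRof [c] = [[c]] := by
      simp [pvRof, hMc, hof, List.count_singleton]
    have h2 : pvStepB (none, 0, []) c = (some c, 0, [[c]]) := rfl
    show pvStepB (pvStB []) c = pvStB [c]
    have h1 : pvStB [] = (none, 0, []) := rfl
    rw [h1, h2]
    simp [pvStB, hRc]
  · obtain ⟨l, hl⟩ : ∃ l, q.getLast? = some l := by
      cases hgl : q.getLast? with
      | none => exact absurd (List.getLast?_eq_none_iff.mp hgl) hq0
      | some l => exact ⟨l, rfl⟩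
    have hlq : l ∈ q := by
      obtain ⟨ys, rfl⟩ := List.getLast?_eq_some_iff.mp hl
      simp
    have hlen : (pvRof q).length = pvMof q := by simp [pvRof]
    have hM1 : 1 ≤ pvMof q := pv_one_le_pvMof q hq0
    have hcount' : ∀ x : Char,
        (q ++ [c]).count x = if x = c then q.count c + 1 else q.count x := by
      intro x
      by_cases hxc : x = c
      · subst hxc
        rw [if_pos rfl, ← List.concat_eq_append, List.count_concat]
      · rw [if_neg hxc]
        simp [List.count_append, Ne.symm hxc]
    by_cases hcq : c ∈ q
    · -- c already present: it is the trailing run, the next bucket index is its count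
      have hlast : q.getLast? = some c := pv_getLast_of_max q hq c hcq hmax
      have hn1 : 1 ≤ q.count c := List.count_pos_iff.mpr hcq
      have hnM : q.count c ≤ pvMof q := pv_count_le_pvMof q c hcq
      have hcD : c ∈ PySem.Set.ofList q := (PySem.Set.mem_ofList q c).mpr hcq
      have hDlt : (PySem.Set.ofList q).Pairwise (· < ·) := pv_ofList_pairwise_lt q hq
      obtain ⟨E, hDE, hElt⟩ := pv_max_last (PySem.Set.ofList q) c hDlt hcD
        (fun x hx => hmax x ((PySem.Set.mem_ofList q x).mp hx))
      have hD' : PySem.Set.ofList (q ++ [c]) = PySem.Set.ofList q := by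
        rw [PySem.Set.ofList_append_singleton, PySem.Set.add_of_mem hcD]
      have hM' : pvMof (q ++ [c]) = max (pvMof q) (q.count c + 1) := by
        apply Nat.le_antisymm
        · rw [pvMof_le_iff]
          intro x hx
          rw [hcount' x]
          by_cases hxc : x = c
          · rw [if_pos hxc]; omega
          · rw [if_neg hxc]
            have hxq : x ∈ q := by
              rcases List.mem_append.mp hx with h | h
              · exact h
              · exact absurd (List.mem_singleton.mp h) hxc
            exact le_trans (pv_count_le_pvMof q x hxq) (Nat.le_max_left _ _)
        · apply Nat.max_le.mpr
          constructor
          · rw [pvMof_le_iff]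
            intro x hx
            have hle : q.count x ≤ (q ++ [c]).count x := by
              rw [hcount' x]
              split_ifs with h
              · subst h; omega
              · exact le_refl _
            exact le_trans hle (pv_count_le_pvMof _ x (List.mem_append_left _ hx))
          · have he : (q ++ [c]).count c = q.count c + 1 := by rw [hcount' c, if_pos rfl]
            calc q.count c + 1 = (q ++ [c]).count c := he.symm
              _ ≤ _ := pv_count_le_pvMof _ c (by simp)
      have hbucket_ne : ∀ j, j ≠ q.count c →
          (PySem.Set.ofList q).filter (fun x => decide (j < (q ++ [c]).count x)) =
          (PySem.Set.ofList q).filter (fun x => decide (j < q.count x)) := by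
        intro j hj
        apply List.filter_congr
        intro x _
        rw [hcount' x]
        by_cases hxc : x = c
        · subst hxc
          rw [if_pos rfl]
          simp only [decide_eq_decide]
          omega
        · rw [if_neg hxc]
      have hbucket_n :
          (PySem.Set.ofList q).filter (fun x => decide (q.count c < (q ++ [c]).count x)) =
          (PySem.Set.ofList q).filter (fun x => decide (q.count c < q.count x)) ++ [c] := by
        have h1 : E.filter (fun x => decide (q.count c < (q ++ [c]).count x)) =
            E.filter (fun x => decide (q.count c < q.count x)) := by
          apply List.filter_congr
          intro x hx
          rw [hcount' x, if_neg (ne_of_lt (hElt x hx))]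
        have h2 : [c].filter (fun x => decide (q.count c < (q ++ [c]).count x)) = [c] := by
          rw [List.filter_singleton]
          rw [hcount' c, if_pos rfl]
          simp
        have h3 : [c].filter (fun x => decide (q.count c < q.count x)) = ([] : List Char) := by
          rw [List.filter_singleton]
          simp
        rw [hDE, List.filter_append, List.filter_append, h1, h2, h3, List.append_nil]
      have hbucket_top : q.count c = pvMof q →
          (PySem.Set.ofList q).filter (fun x => decide (q.count c < q.count x)) = [] := by
        intro h
        rw [List.filter_eq_nil_iff]
        intro x hx
        have hc := pv_count_le_pvMof q x ((PySem.Set.mem_ofList q x).mp hx)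
        simp only [decide_eq_true_eq]
        omega
      -- assemble the tuple equality
      show pvStepB (q.getLast?, q.count ((q.getLast?).getD 'a') - 1, pvRof q) c = _
      rw [hlast]
      rw [pvStepB_eval]
      have hk : (if ((some c : Option Char) == some c) then
          q.count ((some c).getD 'a') - 1 + 1 else 0) = q.count c := by
        simp
        omega
      rw [hk]
      simp only [pvStB, List.getLast?_concat, Option.getD_some]
      rw [hcount' c, if_pos rfl]
      simp only [Nat.add_sub_cancel, Prod.mk.injEq]
      refine ⟨trivial, trivial, ?_⟩
      -- the rounds component
      have hY : pvRof (q ++ [c]) = (List.range (max (pvMof q) (q.count c + 1))).map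
          (fun k => (PySem.Set.ofList q).filter (fun x => decide (k < (q ++ [c]).count x))) := by
        simp only [pvRof, hM', hD']
      rw [hY, hlen]
      by_cases hEq : q.count c = pvMof q
      · rw [if_pos (by simp [hEq])]
        apply List.ext_getElem?
        intro j
        rw [List.getElem?_modify, pv_range_map_getElem]
        rcases lt_trichotomy j (q.count c) with hj | hj | hj
        · rw [List.getElem?_append_left (by rw [hlen]; omega), pv_rof_getElem,
            if_pos (show j < pvMof q by omega),
            if_pos (show j < max (pvMof q) (q.count c + 1) by omega)]
          rw [hbucket_ne j (by omega)]
          simp [show ¬ q.count c = j by omega]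
        · subst hj
          rw [List.getElem?_append_right (by rw [hlen]; omega), hlen]
          rw [show q.count c - pvMof q = 0 by omega]
          rw [List.getElem?_cons_zero,
            if_pos (show q.count c < max (pvMof q) (q.count c + 1) by omega)]
          rw [hbucket_n, hbucket_top hEq]
          simp
        · rw [List.getElem?_eq_none
            (by simp only [List.length_append, List.length_cons, List.length_nil, hlen]; omega)]
          rw [if_neg (show ¬ j < max (pvMof q) (q.count c + 1) by omega)]
          rfl
      · have hlt : q.count c < pvMof q := lt_of_le_of_ne hnM hEq
        rw [if_neg (by simp [hEq])]
        apply List.ext_getElem?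
        intro j
        rw [List.getElem?_modify, pv_rof_getElem, pv_range_map_getElem]
        by_cases hj : j < pvMof q
        · rw [if_pos hj, if_pos (show j < max (pvMof q) (q.count c + 1) by omega)]
          by_cases hjn : q.count c = j
          · subst hjn
            rw [hbucket_n]
            simp
          · rw [hbucket_ne j (fun h => hjn h.symm)]
            simp [hjn]
        · rw [if_neg hj, if_neg (show ¬ j < max (pvMof q) (q.count c + 1) by omega)]
          rfl
    · -- c is new: it opens (or extends) bucket 0
      have hlc : l ≠ c := fun e => hcq (e ▸ hlq)
      have hn0 : q.count c = 0 := List.count_eq_zero.mpr hcq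
      have hcD : c ∉ PySem.Set.ofList q := fun h => hcq ((PySem.Set.mem_ofList q c).mp h)
      have hD' : PySem.Set.ofList (q ++ [c]) = PySem.Set.ofList q ++ [c] := by
        rw [PySem.Set.ofList_append_singleton, PySem.Set.add_of_not_mem hcD]
      have hM' : pvMof (q ++ [c]) = pvMof q := by
        apply Nat.le_antisymm
        · rw [pvMof_le_iff]
          intro x hx
          rw [hcount' x]
          by_cases hxc : x = c
          · rw [if_pos hxc, hn0]; omega
          · rw [if_neg hxc]
            have hxq : x ∈ q := by
              rcases List.mem_append.mp hx with h | h
              · exact h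
              · exact absurd (List.mem_singleton.mp h) hxc
            exact pv_count_le_pvMof q x hxq
        · rw [pvMof_le_iff]
          intro x hx
          have hle : q.count x ≤ (q ++ [c]).count x := by
            rw [hcount' x]
            split_ifs with h
            · subst h; omega
            · exact le_refl _
          exact le_trans hle (pv_count_le_pvMof _ x (List.mem_append_left _ hx))
      have hbsplit : ∀ j : Nat,
          (PySem.Set.ofList q ++ [c]).filter (fun x => decide (j < (q ++ [c]).count x)) =
          (PySem.Set.ofList q).filter (fun x => decide (j < q.count x)) ++
            (if j = 0 then [c] else []) := by
        intro j
        rw [List.filter_append]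
        congr 1
        · apply List.filter_congr
          intro x hx
          have hxq : x ∈ q := (PySem.Set.mem_ofList q x).mp hx
          have hxc : x ≠ c := fun e => hcq (e ▸ hxq)
          rw [hcount' x, if_neg hxc]
        · rw [List.filter_singleton, hcount' c, if_pos rfl, hn0]
          by_cases hj : j = 0
          · subst hj; simp
          · simp [hj]
      -- assemble the tuple equality
      show pvStepB (q.getLast?, q.count ((q.getLast?).getD 'a') - 1, pvRof q) c = _
      rw [hl]
      rw [pvStepB_eval]
      have hk : (if ((some l : Option Char) == some c) then
          q.count ((some l).getD 'a') - 1 + 1 else 0) = 0 := by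
        rw [if_neg (by simp [hlc])]
      rw [hk]
      simp only [pvStB, List.getLast?_concat, Option.getD_some]
      rw [hcount' c, if_pos rfl, hn0]
      simp only [Nat.add_sub_cancel, Prod.mk.injEq]
      refine ⟨trivial, trivial, ?_⟩
      have hY : pvRof (q ++ [c]) = (List.range (pvMof q)).map
          (fun k => (PySem.Set.ofList q ++ [c]).filter
            (fun x => decide (k < (q ++ [c]).count x))) := by
        simp only [pvRof, hM', hD']
      rw [hY, hlen]
      rw [if_neg (by simp only [beq_iff_eq]; omega)]
      apply List.ext_getElem?
      intro j
      rw [List.getElem?_modify, pv_rof_getElem, pv_range_map_getElem]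
      by_cases hj : j < pvMof q
      · rw [if_pos hj, if_pos hj, hbsplit j]
        by_cases hj0 : j = 0
        · subst hj0
          simp
        · simp [hj0, Ne.symm hj0]
      · rw [if_neg hj, if_neg hj]
        rfl

-- the whole distribution fold over a sorted list computes the levels of that list
lemma pv_foldB (u : List Char) :
    u.Pairwise (· ≤ ·) → u.foldl pvStepB (none, 0, []) = pvStB u := by
  induction u using List.reverseRecOn with
  | nil => intro _; rfl
  | append_singleton q c ih =>
    intro hu
    have hq : q.Pairwise (· ≤ ·) :=
      List.Pairwise.sublist (List.sublist_append_left q [c]) hu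
    have hmax : ∀ x ∈ q, x ≤ c := by
      have hp := List.pairwise_append.mp hu
      intro x hx
      exact hp.2.2 x hx c (by simp)
    rw [List.foldl_append, ih hq]
    simp only [List.foldl_cons, List.foldl_nil]
    exact pv_stepB_eq q c hq hmax

lemma pv_enum_range_map (g : Nat → List Char) (M : Nat) :
    PySem.List.enumerate ((List.range M).map g) 0 =
      (List.range M).map (fun (k : Nat) => ((k : Int), g k)) := by
  induction M with
  | zero => rfl
  | succ m ih =>
    rw [List.range_succ, List.map_append, PySem.List.enumerate_append, ih, List.map_append]
    simp [PySem.List.enumerate_cons, PySem.List.enumerate_nil]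

-- ===== VERDICT (by name: the statement is the Claim_ definition above) =====
theorem sortString1_spec : Claim_equal_sortString1 := by
  intro s _
  unfold Spec_sortString1 sortString1 sortString1_alt
  set t := s.toList with ht
  rcases htn : t with _ | ⟨c, rest⟩
  · rfl
  · rw [← htn]
    have htne : t ≠ [] := by rw [htn]; exact List.cons_ne_nil _ _
    have hup : (PySem.List.sorted t (fun x => x)).Pairwise (· ≤ ·) :=
      PySem.List.sorted_pairwise t (fun x => x)
    have hcnt : ∀ x : Char, (PySem.List.sorted t (fun x => x)).count x = t.count x :=
      fun x => List.Perm.count_eq (PySem.List.sorted_perm t (fun x => x) false) x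
    have hmemu : ∀ x : Char, x ∈ PySem.List.sorted t (fun x => x) ↔ x ∈ t := by
      intro x; simp [PySem.List.mem_sorted]
    have hune : PySem.List.sorted t (fun x => x) ≠ [] := by
      intro h
      rw [PySem.List.sorted_eq_nil_iff] at h
      exact htne h
    have hM1 : 1 ≤ pvMof (PySem.List.sorted t (fun x => x)) :=
      pv_one_le_pvMof _ hune
    have hM : ∀ x ∈ t, t.count x ≤ pvMof (PySem.List.sorted t (fun x => x)) := by
      intro x hx
      rw [← hcnt x]
      exact pv_count_le_pvMof _ x ((hmemu x).mpr hx)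
    have hex : ∃ x ∈ t, pvMof (PySem.List.sorted t (fun x => x)) ≤ t.count x := by
      rcases pvMof_attained (PySem.List.sorted t (fun x => x)) with h0 | ⟨x, hxu, hxe⟩
      · omega
      · exact ⟨x, (hmemu x).mp hxu, by rw [← hcnt x, ← hxe]⟩
    -- A's side
    obtain ⟨c0, hc0t, hc0M⟩ := hex
    have hkeys := PySem.Dict.keys_counter t
    have hnd := PySem.Dict.nodup_keys_counter t
    have hitems := PySem.Dict.items_counter t
    have hinv0 : pvInv t 0 (PySem.Dict.counter t) := by
      refine ⟨hnd, ?_, ?_⟩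
      · intro x
        rw [hkeys, PySem.Set.mem_ofList]
        constructor
        · intro h; exact ⟨h, List.count_pos_iff.mpr h⟩
        · exact fun h => h.1
      · intro x hx
        have hct : x ∈ t := by rw [hkeys, PySem.Set.mem_ofList] at hx; exact hx
        have hcm : (x, ((t.count x : Int))) ∈ (PySem.Dict.counter t).items := by
          rw [hitems]
          exact List.mem_map.mpr ⟨x, (PySem.Set.mem_ofList t x).mpr hct, rfl⟩
        rw [PySem.Dict.get?_of_mem_items _ hcm hnd]
        norm_num
    have hfuel : pvMof (PySem.List.sorted t (fun x => x)) - 0 ≤ t.length := by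
      have h1 := List.count_le_length (a := c0) (l := t)
      omega
    have hA := pvLoopA_eq t (pvMof (PySem.List.sorted t (fun x => x))) hM
      ⟨c0, hc0t, hc0M⟩ t.length 0 (PySem.Dict.counter t) [] hinv0 hfuel
    simp only [Nat.sub_zero, Nat.zero_add, List.nil_append] at hA
    have hA' : pvLoopA t.length (PySem.Dict.counter t) [] true =
        ((List.range (pvMof (PySem.List.sorted t (fun x => x)))).map
          (fun j => pvLevel t j)).flatten := by
      rw [← hA]; norm_num
    rw [hA']
    -- B's side
    rw [pv_foldB (PySem.List.sorted t (fun x => x)) hup]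
    have hchars : PySem.Set.ofList (PySem.List.sorted t (fun x => x)) =
        PySem.List.sorted (PySem.Set.ofList t) (fun x => x) := by
      symm
      apply PySem.List.sorted_eq_of_perm_of_pairwise_lt
      · rw [List.perm_ext_iff_of_nodup (PySem.Set.nodup_ofList _) (PySem.Set.nodup_ofList t)]
        intro a
        simp [PySem.Set.mem_ofList, PySem.List.mem_sorted]
      · exact pv_ofList_pairwise_lt _ hup
    have hRofEq : pvRof (PySem.List.sorted t (fun x => x)) =
        (List.range (pvMof (PySem.List.sorted t (fun x => x)))).map
          (fun k => (PySem.List.sorted (PySem.Set.ofList t) (fun x => x)).filter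
            (fun x => decide (k < t.count x))) := by
      simp only [pvRof, hchars]
      apply List.map_congr_left
      intro k _
      apply List.filter_congr
      intro x _
      rw [hcnt x]
    simp only [pvStB]
    rw [hRofEq]
    rw [PySem.List.foldl_append_eq_flatMap
      (fun p : Int × List Char => if PySem.Int.mod p.1 2 == 0 then p.2 else p.2.reverse)]
    rw [List.nil_append, pv_enum_range_map]
    rw [List.flatMap_map, List.flatMap_def]
    apply congrArg String.ofList
    apply congrArg List.flatten
    apply List.map_congr_left
    intro k _
    dsimp only
    have hpar : (PySem.Int.mod (k : Int) 2 == 0) = decide (k % 2 = 0) := by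
      rw [PySem.Int.mod_eq_emod_of_pos (by norm_num)]
      rcases Nat.mod_two_eq_zero_or_one k with h | h
      · have h2 : ((k : Int)) % 2 = 0 := by omega
        simp [h2, h]
      · have h2 : ((k : Int)) % 2 = 1 := by omega
        simp [h2, h]
    rw [hpar]
    unfold pvLevel
    by_cases hp : k % 2 = 0 <;> simp [hp]
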